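-- pv_equiv track=rewrite | github.com/alexandraback/datacollection | solutions_5695413893988352_0/Python/Jeddo/B.py | func
-- ===== SOURCE A (Python) =====
-- def func(C,J):
--     big = 'U'
--     res1 = ''
--     res2 = ''
--     for i in range(len(C)):
--         a= C[i]
--         b = J[i]
--         ka = a!= '?'
--         kb = b!= '?'
--         if ka and kb:
--             res1 += a
--             res2 += str(b)
--             if big == 'U'and (a!=b):
--                 if int(a)>int(b):
--                     big = 'C'
--                 else:
--                     big = 'J'
--         elif (not ka) and (not kb):
--             if big =='U':
--                 res1 += '0'
--                 res2 += '0'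
--             elif big =='C':
--                 res1 += '0'
--                 res2 += '9'
--             elif big == 'J':
--                 res1 += '9'
--                 res2 += '0'
--         elif not ka:
--             if big == 'U':
--                 res1 += str(b)
--                 res2 += str(b)
--             elif big =='C':
--                 res1 += '0'
--                 res2 += str(b)
--             elif big =='J':
--                 res1 += '9'
--                 res2 += str(b)
--         elif not kb:
--             if big == 'U':
--                 res1 += str(a)
--                 res2 += str(a)
--             elif big =='C':
--                 res2 += '9'
--                 res1 += str(a)
--             elif big =='J':
--                 res2 += '0'
--                 res1 += str(a)
--     return res1,res2
-- ===== SOURCE B (Python) =====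
-- def func(C, J):
--     n = len(C)
--     d = next((i for i in range(n)
--               if C[i] != '?' and J[i] != '?' and C[i] != J[i]), None)
--     if d is None:
--         big = 'U'
--     else:
--         big = 'C' if int(C[d]) > int(J[d]) else 'J'
--
--     def fill(i):
--         a, b = C[i], J[i]
--         if d is None or i < d:
--             if a != '?' and b != '?':
--                 return a, b
--             if a == '?' and b == '?':
--                 return '0', '0'
--             return (b, b) if a == '?' else (a, a)
--         if a != '?' and b != '?':
--             return a, b
--         if big == 'C':
--             return ('0' if a == '?' else a), ('9' if b == '?' else b)
--         return ('9' if a == '?' else a), ('0' if b == '?' else b)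
--
--     pairs = [fill(i) for i in range(n)]
--     return ''.join(p[0] for p in pairs), ''.join(p[1] for p in pairs)
-- ===== Notes on version B (the rewrite author's own statement) =====
-- stated objective: alternative
-- what changed: Replaces A's single-pass state machine with a lazily-updated 'big' flag by a two-phase scheme: first locate the pivot index (first position where both digits are known and differ) and fix 'big' once, then fill every position with a pure per-index function (equal-fill before the pivot, forced-order fill from it on) and join.
import Mathlib
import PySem

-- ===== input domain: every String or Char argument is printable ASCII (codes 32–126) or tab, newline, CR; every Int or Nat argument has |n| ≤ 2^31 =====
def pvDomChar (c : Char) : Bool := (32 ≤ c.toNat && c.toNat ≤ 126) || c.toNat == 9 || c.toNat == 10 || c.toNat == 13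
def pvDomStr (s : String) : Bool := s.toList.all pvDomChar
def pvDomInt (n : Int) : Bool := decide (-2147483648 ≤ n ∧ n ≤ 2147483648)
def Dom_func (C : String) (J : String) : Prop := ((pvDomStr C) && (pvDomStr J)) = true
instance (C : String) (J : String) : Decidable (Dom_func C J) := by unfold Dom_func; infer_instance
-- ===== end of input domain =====

-- B replaces A's lazily-updated state machine by pivot-finding plus a pure per-index fill (objective: alternative).
-- ===== PORT A =====
-- one loop iteration of A: state (big, res1, res2), branch structure as in the Python
def stepA (cs js : List Char) (st : Char × List Char × List Char) (i : Nat) :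
    Char × List Char × List Char :=
  let a := cs.getD i ' '
  let b := js.getD i ' '
  let big := st.1
  let r1 := st.2.1
  let r2 := st.2.2
  if a ≠ '?' ∧ b ≠ '?' then
    let big' := if big = 'U' ∧ a ≠ b then
        (if (PySem.Int.ofStr? (String.mk [a])).getD 0 > (PySem.Int.ofStr? (String.mk [b])).getD 0
         then 'C' else 'J')
      else big
    (big', r1 ++ [a], r2 ++ [b])
  else if a = '?' ∧ b = '?' then
    if big = 'U' then (big, r1 ++ ['0'], r2 ++ ['0'])
    else if big = 'C' then (big, r1 ++ ['0'], r2 ++ ['9'])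
    else if big = 'J' then (big, r1 ++ ['9'], r2 ++ ['0'])
    else (big, r1, r2)
  else if a = '?' then
    if big = 'U' then (big, r1 ++ [b], r2 ++ [b])
    else if big = 'C' then (big, r1 ++ ['0'], r2 ++ [b])
    else if big = 'J' then (big, r1 ++ ['9'], r2 ++ [b])
    else (big, r1, r2)
  else
    if big = 'U' then (big, r1 ++ [a], r2 ++ [a])
    else if big = 'C' then (big, r1 ++ [a], r2 ++ ['9'])
    else if big = 'J' then (big, r1 ++ [a], r2 ++ ['0'])
    else (big, r1, r2)

def func (C : String) (J : String) : String × String :=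
  let cs := C.toList
  let js := J.toList
  let r := (List.range cs.length).foldl (stepA cs js) ('U', [], [])
  (String.mk r.2.1, String.mk r.2.2)

-- ===== PORT B =====
-- the pivot predicate of Source B's `next(...)` search
def hitP (cs js : List Char) (i : Nat) : Bool :=
  cs.getD i ' ' != '?' && js.getD i ' ' != '?' && cs.getD i ' ' != js.getD i ' '

-- Source B's local `fill(i)`
def fillB (cs js : List Char) (d : Option Nat) (big : Char) (i : Nat) : Char × Char :=
  let a := cs.getD i ' '
  let b := js.getD i ' '
  if d.elim true (fun k => decide (i < k)) then
    if a ≠ '?' ∧ b ≠ '?' then (a, b)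
    else if a = '?' ∧ b = '?' then ('0', '0')
    else if a = '?' then (b, b)
    else (a, a)
  else
    if a ≠ '?' ∧ b ≠ '?' then (a, b)
    else if big = 'C' then ((if a = '?' then '0' else a), (if b = '?' then '9' else b))
    else ((if a = '?' then '9' else a), (if b = '?' then '0' else b))

def func_alt (C : String) (J : String) : String × String :=
  let cs := C.toList
  let js := J.toList
  let n := cs.length
  let d := (List.range n).find? (hitP cs js)
  let big := d.elim 'U' (fun k =>
    if (PySem.Int.ofStr? (String.mk [cs.getD k ' '])).getD 0 >
       (PySem.Int.ofStr? (String.mk [js.getD k ' '])).getD 0 then 'C' else 'J')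
  let pairs := (List.range n).map (fillB cs js d big)
  (String.mk (pairs.map Prod.fst), String.mk (pairs.map Prod.snd))

-- ===== PRECONDITION & SPEC =====
-- Pre_ excludes exactly the inputs on which the Python A raises: J shorter than C (IndexError),
-- and a non-digit character at the first known-known differing position (int() ValueError).
def Pre_func (C : String) (J : String) : Prop :=
  C.toList.length ≤ J.toList.length ∧
  ∀ i, i < C.toList.length →
    (∀ j, j < i → hitP C.toList J.toList j = false) →
    hitP C.toList J.toList i = true →
    ((C.toList.getD i ' ').isDigit ∧ (J.toList.getD i ' ').isDigit)
instance (C : String) (J : String) : Decidable (Pre_func C J) := by unfold Pre_func; infer_instance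
def pvWitness_func : String × String := ("1?3", "3?1")

def Spec_func (C : String) (J : String) (out : String × String) : Prop := out = func_alt C J
instance (C : String) (J : String) (out : String × String) : Decidable (Spec_func C J out) := by unfold Spec_func; infer_instance

-- ===== CLAIM (what is proved, stated in full; the proofs are below) =====
def Claim_equal_func : Prop := ∀ (C : String) (J : String), Dom_func C J → Pre_func C J → Spec_func C J (func C J)

-- ===== LEMMAS AND PROOFS =====

-- A's big chosen at the pivot
def bigOf (cs js : List Char) (i : Nat) : Char :=
  if (PySem.Int.ofStr? (String.mk [cs.getD i ' '])).getD 0 >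
     (PySem.Int.ofStr? (String.mk [js.getD i ' '])).getD 0 then 'C' else 'J'

theorem stepA_U (cs js : List Char) (r1 r2 : List Char) (i : Nat)
    (h : hitP cs js i = false) :
    stepA cs js ('U', r1, r2) i =
      ('U', r1 ++ [(fillB cs js none 'U' i).1], r2 ++ [(fillB cs js none 'U' i).2]) := by
  simp only [stepA, fillB, hitP, Option.elim] at *
  split_ifs <;> simp_all

theorem stepA_hit (cs js : List Char) (r1 r2 : List Char) (i : Nat)
    (h : hitP cs js i = true) :
    stepA cs js ('U', r1, r2) i = (bigOf cs js i, r1 ++ [cs.getD i ' '], r2 ++ [js.getD i ' ']) := by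
  simp only [hitP, Bool.and_eq_true, bne_iff_ne, ne_eq] at h
  simp only [stepA, bigOf]
  split_ifs <;> simp_all

theorem stepA_G (cs js : List Char) (g : Char) (hg : g = 'C' ∨ g = 'J')
    (r1 r2 : List Char) (i : Nat) :
    stepA cs js (g, r1, r2) i =
      (g, r1 ++ [(fillB cs js (some 0) g i).1], r2 ++ [(fillB cs js (some 0) g i).2]) := by
  rcases hg with hg | hg <;> subst hg <;>
    simp only [stepA, fillB, Option.elim] <;> split_ifs <;> simp_all

theorem foldU (cs js : List Char) (l : List Nat) (h : ∀ i ∈ l, hitP cs js i = false) :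
    ∀ r1 r2, List.foldl (stepA cs js) ('U', r1, r2) l =
      ('U', r1 ++ l.map (fun i => (fillB cs js none 'U' i).1),
            r2 ++ l.map (fun i => (fillB cs js none 'U' i).2)) := by
  induction l with
  | nil => simp
  | cons i l ih =>
      intro r1 r2
      have hi : hitP cs js i = false := h i (List.mem_cons_self ..)
      simp only [List.foldl_cons, stepA_U cs js r1 r2 i hi,
        ih (fun j hj => h j (List.mem_cons_of_mem _ hj)), List.map_cons]
      simp

theorem foldG (cs js : List Char) (g : Char) (hg : g = 'C' ∨ g = 'J') (l : List Nat) :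
    ∀ r1 r2, List.foldl (stepA cs js) (g, r1, r2) l =
      (g, r1 ++ l.map (fun i => (fillB cs js (some 0) g i).1),
          r2 ++ l.map (fun i => (fillB cs js (some 0) g i).2)) := by
  induction l with
  | nil => simp
  | cons i l ih =>
      intro r1 r2
      simp only [List.foldl_cons, stepA_G cs js g hg r1 r2 i, ih, List.map_cons]
      simp

theorem fill_pre (cs js : List Char) (k : Nat) (g : Char) (i : Nat) (h : i < k) :
    fillB cs js (some k) g i = fillB cs js none 'U' i := by
  simp [fillB, Option.elim, h]

theorem fill_post (cs js : List Char) (k : Nat) (g : Char) (i : Nat) (h : ¬ i < k) :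
    fillB cs js (some k) g i = fillB cs js (some 0) g i := by
  simp [fillB, Option.elim, h]

theorem fill_at_hit (cs js : List Char) (k : Nat) (g : Char) (h : hitP cs js k = true) :
    fillB cs js (some k) g k = (cs.getD k ' ', js.getD k ' ') := by
  simp only [hitP, Bool.and_eq_true, bne_iff_ne, ne_eq, List.getD_eq_getElem?_getD] at h
  simp [fillB, Option.elim, h.1.1, h.1.2]

theorem findRange (p : Nat → Bool) :
    ∀ n k, (List.range n).find? p = some k → k < n ∧ p k = true ∧ ∀ j < k, p j = false := by
  intro n
  induction n with
  | zero => simp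
  | succ n ih =>
      intro k h
      rw [List.range_succ, List.find?_append] at h
      rcases hn : (List.range n).find? p with _ | k'
      · rw [hn] at h
        by_cases hp : p n
        · have hk : k = n := by simp [hp] at h; omega
          subst hk
          refine ⟨by omega, hp, ?_⟩
          intro j hj
          simpa using List.find?_eq_none.mp hn j (List.mem_range.mpr hj)
        · simp [hp] at h
      · rw [hn] at h
        have hk : k' = k := by simpa using h
        obtain ⟨h1, h2, h3⟩ := ih k' hn
        exact hk ▸ ⟨by omega, h2, h3⟩

theorem bigOf_cases (cs js : List Char) (k : Nat) : bigOf cs js k = 'C' ∨ bigOf cs js k = 'J' := by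
  unfold bigOf; split_ifs <;> simp

-- the core identity, on the char lists
theorem main_core (cs js : List Char) :
    ((List.range cs.length).foldl (stepA cs js) ('U', [], [])).2 =
    (let d := (List.range cs.length).find? (hitP cs js)
     let big := d.elim 'U' (fun k => bigOf cs js k)
     let pairs := (List.range cs.length).map (fillB cs js d big)
     (pairs.map Prod.fst, pairs.map Prod.snd)) := by
  simp only
  rcases hd : (List.range cs.length).find? (hitP cs js) with _ | k
  · -- no pivot: big stays 'U'
    have hall : ∀ i ∈ List.range cs.length, hitP cs js i = false := by
      intro i hi
      simpa using List.find?_eq_none.mp hd i hi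
    rw [foldU cs js _ hall]
    simp [List.map_map, Function.comp]
  · obtain ⟨hkn, hk, hfirst⟩ := findRange (hitP cs js) cs.length k hd
    set g := bigOf cs js k with hgdef
    have hg := bigOf_cases cs js k
    have hsplit : List.range cs.length
        = List.range k ++ k :: List.range' (k+1) (cs.length - k - 1) := by
      rw [List.range_eq_range', List.range_eq_range']
      have : cs.length = k + (cs.length - k - 1 + 1) := by omega
      rw [this, ← List.range'_append_1]
      simp [List.range'_succ]
    have hpre : ∀ i ∈ List.range k, hitP cs js i = false := fun i hi =>
      hfirst i (List.mem_range.mp hi)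
    have hmap : (List.range k ++ k :: List.range' (k+1) (cs.length - k - 1)).map
          (fillB cs js (some k) g)
        = (List.range k).map (fun i => fillB cs js none 'U' i)
          ++ (cs.getD k ' ', js.getD k ' ')
          :: (List.range' (k+1) (cs.length - k - 1)).map (fun i => fillB cs js (some 0) g i) := by
      rw [List.map_append, List.map_cons]
      congr 1
      · exact List.map_congr_left fun i hi => fill_pre cs js k g i (List.mem_range.mp hi)
      · rw [fill_at_hit cs js k g hk]
        congr 1
        refine List.map_congr_left fun i hi => fill_post cs js k g i ?_
        have := List.mem_range'.mp hi
        omega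
    rw [hsplit, List.foldl_append, List.foldl_cons]
    rw [foldU cs js _ hpre, stepA_hit cs js _ _ k hk, ← hgdef, foldG cs js g hg,
        Option.elim_some, ← hgdef, hmap]
    simp [List.map_map, Function.comp_def]

-- ===== VERDICT (by name: the statement is the Claim_ definition above) =====
theorem func_spec : Claim_equal_func := by
  intro C J _ _
  unfold Spec_func func func_alt
  simp only
  have h := main_core C.toList J.toList
  have h1 := congrArg Prod.fst h
  have h2 := congrArg Prod.snd h
  simp only [Option.elim] at h1 h2
  exact Prod.ext (congrArg String.mk (by exact h1)) (congrArg String.mk (by exact h2))
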